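-- pv_equiv track=rewrite | github.com/ConorMacBride/smart | smart/schedule.py | merge_timetables
-- ===== SOURCE A (Python) =====
-- def merge_timetables(base_timetable, timetable):
--     timetable = [(*block, 0) for block in base_timetable] + [
--         (*block, 1) for block in timetable
--     ]
--     timetable = sorted(timetable, key=lambda x: x[0])
--
--     # Merge timetables
--     last_base_block = next(
--         filter(lambda block: block[-1] == 0, reversed(timetable))
--     )  # last base block
--     merged_timetable = []
--     start_block = None
--     for block in timetable:
--         if block[-1] == 1:
--             if block[2] == "reset":
--                 merged_timetable.append(
--                     (block[0], last_base_block[1], last_base_block[2])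
--                 )
--                 start_block = None
--             else:
--                 start_block = block
--                 merged_timetable.append(block[:-1])
--         else:
--             last_base_block = block[:-1]
--             if start_block is None:
--                 merged_timetable.append(block[:-1])
--
--     # Cut overlapping end times
--     timetable = []
--     for idx in range(len(merged_timetable) - 1):
--         timetable.append(
--             (
--                 merged_timetable[idx][0],
--                 merged_timetable[idx + 1][0],
--                 merged_timetable[idx][2],
--             )
--         )
--     timetable.append(
--         (
--             merged_timetable[-1][0],
--             merged_timetable[0][0],
--             merged_timetable[-1][2],
--         )
--     )
--     merged_timetable = timetable
--
--     # Remove empty time ranges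
--     merged_timetable = [block for block in merged_timetable if block[0] != block[1]]
--
--     # Remove redundant splits
--     merged = []
--     current_start, current_end, current_temperature = merged_timetable[0]
--     for start, end, temperature in merged_timetable[1:]:
--         if temperature == current_temperature:
--             current_end = end
--         else:
--             merged.append((current_start, current_end, current_temperature))
--             current_start, current_end, current_temperature = (
--                 start,
--                 end,
--                 temperature,
--             )
--     merged.append((current_start, current_end, current_temperature))
--     merged_timetable = merged
--
--     return merged_timetable
-- ===== SOURCE B (Python) =====
-- def merge_timetables(base_timetable, timetable):
--     tagged = sorted(
--         [(s, e, t, 0) for s, e, t in base_timetable]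
--         + [(s, e, t, 1) for s, e, t in timetable],
--         key=lambda x: x[0],
--     )
--
--     # Phase 1: split the sorted list into a leading run of base blocks and
--     # segments, each an override block together with the base blocks after it.
--     lead, segs, cur = [], [], None
--     for b in tagged:
--         if b[3] == 1:
--             if cur is not None:
--                 segs.append(cur)
--             cur = (b, [])
--         elif cur is None:
--             lead.append(b)
--         else:
--             cur[1].append(b)
--     if cur is not None:
--         segs.append(cur)
--
--     # Phase 2: emit (start, temperature) entries segment by segment.
--     entries = [(s, t) for s, _, t, _ in lead]
--     seg_base_temps = [b[2] for _, bs in segs for b in bs]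
--     last_base = lead[-1][2] if lead else seg_base_temps[-1]
--     for (s, _, t, _), bases in segs:
--         if t == "reset":
--             entries.append((s, last_base))
--             entries.extend((bs_, bt) for bs_, _, bt, _ in bases)
--         else:
--             entries.append((s, t))
--         if bases:
--             last_base = bases[-1][2]
--
--     # Phase 3: ranges by zipping with the rotated start list, dropping empties.
--     starts = [s for s, _ in entries]
--     ranges = [(s, e, t) for (s, t), e in zip(entries, starts[1:] + starts[:1]) if s != e]
--
--     # Phase 4: coalesce equal-temperature runs by extending the last range in place.
--     merged = []
--     for r in ranges:
--         if merged and merged[-1][2] == r[2]: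
--             merged[-1] = (merged[-1][0], r[1], r[2])
--         else:
--             merged.append(r)
--     return merged
-- ===== Notes on version B (the rewrite author's own statement) =====
-- stated objective: alternative
-- what changed: B replaces A's per-block stateful replay (tracking last_base_block/start_block) and its three trailing passes by a group-by-override pipeline: it splits the sorted tagged list into a leading base run plus (override, following bases) segments, emits each segment's entries wholesale, builds ranges declaratively by zipping the entry list with its rotated start list, and coalesces by extending the last emitted range in place.
import Mathlib
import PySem

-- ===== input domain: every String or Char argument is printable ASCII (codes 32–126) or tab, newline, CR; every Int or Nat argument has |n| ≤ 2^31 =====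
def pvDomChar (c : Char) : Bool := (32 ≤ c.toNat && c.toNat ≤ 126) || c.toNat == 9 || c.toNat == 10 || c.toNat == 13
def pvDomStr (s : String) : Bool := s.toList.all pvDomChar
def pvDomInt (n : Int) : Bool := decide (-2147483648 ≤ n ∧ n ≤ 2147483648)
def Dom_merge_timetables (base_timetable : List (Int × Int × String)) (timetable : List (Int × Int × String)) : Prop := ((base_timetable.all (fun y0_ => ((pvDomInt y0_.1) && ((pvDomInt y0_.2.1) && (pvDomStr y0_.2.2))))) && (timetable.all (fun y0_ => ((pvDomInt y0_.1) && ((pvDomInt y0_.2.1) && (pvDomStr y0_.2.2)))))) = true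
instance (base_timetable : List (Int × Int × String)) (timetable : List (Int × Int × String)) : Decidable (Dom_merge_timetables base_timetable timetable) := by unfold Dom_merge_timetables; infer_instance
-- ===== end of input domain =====

-- B replaces A's stateful replay and three trailing passes by a group-by-override segmentation
-- pipeline (segment emission, zip-with-rotation ranges, extend-last coalescing): an alternative
-- decomposition of the same cost, proved to return A's exact value on Pre_.

-- ===== PORT A =====
-- one step of A's merge loop; state = (last_base_block, start_block, merged_timetable)
def mtA_step (st : (Int × Int × String) × Option (Int × Int × String × Int) × List (Int × Int × String))
    (block : Int × Int × String × Int) :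
    (Int × Int × String) × Option (Int × Int × String × Int) × List (Int × Int × String) :=
  if block.2.2.2 = 1 then
    if block.2.2.1 = "reset" then (st.1, none, st.2.2 ++ [(block.1, st.1.2.1, st.1.2.2)])
    else (st.1, some block, st.2.2 ++ [(block.1, block.2.1, block.2.2.1)])
  else ((block.1, block.2.1, block.2.2.1), st.2.1,
        if st.2.1.isNone then st.2.2 ++ [(block.1, block.2.1, block.2.2.1)] else st.2.2)

-- A's "cut overlapping end times" pass (m[-1] on empty m raises in Python; excluded by Pre_)
def mtA_cut (m : List (Int × Int × String)) : List (Int × Int × String) :=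
  ((List.range (m.length - 1)).foldl (fun acc idx =>
      acc ++ [((m.getD idx (0, 0, "")).1, (m.getD (idx + 1) (0, 0, "")).1, (m.getD idx (0, 0, "")).2.2)]) [])
  ++ [((m.getD (m.length - 1) (0, 0, "")).1, (m.getD 0 (0, 0, "")).1, (m.getD (m.length - 1) (0, 0, "")).2.2)]

-- A's "remove redundant splits" pass (ms[0] on empty ms raises in Python; excluded by Pre_)
def mtA_coal (ms : List (Int × Int × String)) : List (Int × Int × String) :=
  match ms with
  | [] => []
  | (s, e, t) :: rest =>
    let fin := rest.foldl (fun (st : List (Int × Int × String) × Int × Int × String) b =>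
        if b.2.2 = st.2.2.2 then (st.1, st.2.1, b.2.1, st.2.2.2)
        else (st.1 ++ [(st.2.1, st.2.2.1, st.2.2.2)], b.1, b.2.1, b.2.2)) ([], s, e, t)
    fin.1 ++ [(fin.2.1, fin.2.2.1, fin.2.2.2)]

def merge_timetables (base_timetable : List (Int × Int × String)) (timetable : List (Int × Int × String)) : List (Int × Int × String) :=
  let tagged := base_timetable.map (fun x => (x.1, x.2.1, x.2.2, (0 : Int)))
      ++ timetable.map (fun x => (x.1, x.2.1, x.2.2, (1 : Int)))
  let sortedT := PySem.List.sorted tagged (fun x => x.1) false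
  match sortedT.reverse.find? (fun x => x.2.2.2 == 0) with
  | none => []   -- Python raises StopIteration here; excluded by Pre_
  | some lb0 =>
    let fin := sortedT.foldl mtA_step ((lb0.1, lb0.2.1, lb0.2.2.1), none, [])
    mtA_coal ((mtA_cut fin.2.2).filter (fun x => !(x.1 == x.2.1)))

-- ===== PORT B =====
-- Phase 1: segmentation step; state = (lead, segs, cur), cur the open (override, bases) segment
def mtB_segStep
    (st : List (Int × Int × String × Int) × List ((Int × Int × String × Int) × List (Int × Int × String × Int)) × Option ((Int × Int × String × Int) × List (Int × Int × String × Int)))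
    (b : Int × Int × String × Int) :
    List (Int × Int × String × Int) × List ((Int × Int × String × Int) × List (Int × Int × String × Int)) × Option ((Int × Int × String × Int) × List (Int × Int × String × Int)) :=
  if b.2.2.2 = 1 then
    (st.1, (match st.2.2 with | some c => st.2.1 ++ [c] | none => st.2.1), some (b, []))
  else match st.2.2 with
    | none => (st.1 ++ [b], st.2.1, none)
    | some c => (st.1, st.2.1, some (c.1, c.2 ++ [b]))

def mtB_segments (L : List (Int × Int × String × Int)) :
    List (Int × Int × String × Int) × List ((Int × Int × String × Int) × List (Int × Int × String × Int)) :=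
  match L.foldl mtB_segStep ([], [], none) with
  | (lead, segs, some c) => (lead, segs ++ [c])
  | (lead, segs, none) => (lead, segs)

-- Phase 2: emit one segment's (start, temperature) entries; state = (last_base, entries)
def mtB_emit (st : String × List (Int × String))
    (sg : (Int × Int × String × Int) × List (Int × Int × String × Int)) : String × List (Int × String) :=
  ((match sg.2.getLast? with | some b => b.2.2.1 | none => st.1),
   if sg.1.2.2.1 = "reset" then st.2 ++ [(sg.1.1, st.1)] ++ sg.2.map (fun b => (b.1, b.2.2.1))
   else st.2 ++ [(sg.1.1, sg.1.2.2.1)])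

-- Phase 4: coalesce by extending the last emitted range in place
def mtB_coalStep (merged : List (Int × Int × String)) (r : Int × Int × String) : List (Int × Int × String) :=
  match merged.getLast? with
  | some lastR => if lastR.2.2 = r.2.2 then merged.dropLast ++ [(lastR.1, r.2.1, r.2.2)] else merged ++ [r]
  | none => merged ++ [r]

def merge_timetables_alt (base_timetable : List (Int × Int × String)) (timetable : List (Int × Int × String)) : List (Int × Int × String) :=
  let tagged := base_timetable.map (fun x => (x.1, x.2.1, x.2.2, (0 : Int)))
      ++ timetable.map (fun x => (x.1, x.2.1, x.2.2, (1 : Int)))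
  let sortedT := PySem.List.sorted tagged (fun x => x.1) false
  let p := mtB_segments sortedT
  let segBaseTemps := p.2.flatMap (fun sg => sg.2.map (fun b => b.2.2.1))
  -- Python raises IndexError here when there is no base block at all; excluded by Pre_
  let lastBase0 := match p.1.getLast? with | some b => b.2.2.1 | none => segBaseTemps.getLastD ""
  let entries := (p.2.foldl mtB_emit (lastBase0, p.1.map (fun b => (b.1, b.2.2.1)))).2
  let starts := entries.map (fun e => e.1)
  let ranges := ((entries.zip (starts.drop 1 ++ starts.take 1)).filter
      (fun q => !(q.1.1 == q.2))).map (fun q => (q.1.1, q.2, q.1.2))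
  ranges.foldl mtB_coalStep []

-- ===== PRECONDITION & SPEC =====
-- Pre_ excludes exactly the inputs on which A raises: StopIteration when base_timetable is empty,
-- and IndexError when every produced time range is empty (all starts equal, or every emitted entry
-- shares the minimal start because an overriding non-reset block at the minimum is never reset).
def Pre_merge_timetables (base_timetable : List (Int × Int × String)) (timetable : List (Int × Int × String)) : Prop :=
  base_timetable ≠ [] ∧
  (∃ x ∈ base_timetable ++ timetable, ∃ y ∈ base_timetable ++ timetable, x.1 ≠ y.1) ∧
  ¬ (timetable ≠ [] ∧ (∀ x ∈ timetable, ∀ y ∈ base_timetable ++ timetable, x.1 ≤ y.1) ∧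
      timetable.getLast?.map (fun z => z.2.2) ≠ some "reset")

instance (base_timetable : List (Int × Int × String)) (timetable : List (Int × Int × String)) : Decidable (Pre_merge_timetables base_timetable timetable) := by
  unfold Pre_merge_timetables; infer_instance

def pvWitness_merge_timetables : (List (Int × Int × String)) × (List (Int × Int × String)) :=
  ([(0, 6, "18")], [(1, 2, "21")])

def Spec_merge_timetables (base_timetable : List (Int × Int × String)) (timetable : List (Int × Int × String)) (out : List (Int × Int × String)) : Prop := out = merge_timetables_alt base_timetable timetable
instance (base_timetable : List (Int × Int × String)) (timetable : List (Int × Int × String)) (out : List (Int × Int × String)) : Decidable (Spec_merge_timetables base_timetable timetable out) := by unfold Spec_merge_timetables; infer_instance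

-- ===== CLAIM (what is proved, stated in full; the proofs are below) =====
def Claim_equal_merge_timetables : Prop := ∀ (base_timetable : List (Int × Int × String)) (timetable : List (Int × Int × String)), Dom_merge_timetables base_timetable timetable → Pre_merge_timetables base_timetable timetable → Spec_merge_timetables base_timetable timetable (merge_timetables base_timetable timetable)

-- ===== LEMMAS AND PROOFS =====

-- projection from A's merged_timetable entries to B's (start, temperature) entries
def pvProj (x : Int × Int × String) : Int × String := (x.1, x.2.2)

-- proof-side simulation state: one step of a flat replay over (last_temp, pending, entries)
def mtS_step (st : String × Bool × List (Int × String)) (block : Int × Int × String × Int) :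
    String × Bool × List (Int × String) :=
  if block.2.2.2 = 0 then
    (block.2.2.1, st.2.1, if st.2.1 then st.2.2 else st.2.2 ++ [(block.1, block.2.2.1)])
  else if block.2.2.1 = "reset" then (st.1, false, st.2.2 ++ [(block.1, st.1)])
  else (st.1, true, st.2.2 ++ [(block.1, block.2.2.1)])

-- the flat replay simulates A's merge loop: same entries up to pvProj, pending = start_block.isSome
lemma loop_sim (L : List (Int × Int × String × Int))
    (hL : ∀ b ∈ L, b.2.2.2 = 0 ∨ b.2.2.2 = 1) :
    ∀ (lb : Int × Int × String) (sb : Option (Int × Int × String × Int)) (m : List (Int × Int × String)),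
    L.foldl mtS_step (lb.2.2, sb.isSome, m.map pvProj)
      = ((L.foldl mtA_step (lb, sb, m)).1.2.2, (L.foldl mtA_step (lb, sb, m)).2.1.isSome,
         (L.foldl mtA_step (lb, sb, m)).2.2.map pvProj) := by
  induction L with
  | nil => intro lb sb m; simp
  | cons b L ih =>
    intro lb sb m
    have hb := hL b (List.mem_cons_self)
    have hL' : ∀ x ∈ L, x.2.2.2 = 0 ∨ x.2.2.2 = 1 := fun x hx => hL x (List.mem_cons_of_mem b hx)
    have key : mtS_step (lb.2.2, sb.isSome, m.map pvProj) b
        = ((mtA_step (lb, sb, m) b).1.2.2, (mtA_step (lb, sb, m) b).2.1.isSome,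
           (mtA_step (lb, sb, m) b).2.2.map pvProj) := by
      rcases hb with h0 | h1
      · cases sb <;> simp [mtA_step, mtS_step, h0, pvProj]
      · by_cases hr : b.2.2.1 = "reset" <;> simp [mtA_step, mtS_step, h1, hr, pvProj]
    have hrec := ih hL' (mtA_step (lb, sb, m) b).1 (mtA_step (lb, sb, m) b).2.1 (mtA_step (lb, sb, m) b).2.2
    simp only [List.foldl_cons, key]
    simpa using hrec

-- B's initial last_base as a function of the leading run
def initLB (lead : List (Int × Int × String × Int)) (lb0 : String) : String :=
  match lead.getLast? with | some b => b.2.2.1 | none => lb0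

def projE (b : Int × Int × String × Int) : Int × String := (b.1, b.2.2.1)

-- the flat-replay state corresponding to a segmentation mid-state
def emitUpTo (lead : List (Int × Int × String × Int))
    (segs : List ((Int × Int × String × Int) × List (Int × Int × String × Int)))
    (cur : Option ((Int × Int × String × Int) × List (Int × Int × String × Int)))
    (lb0 : String) : String × Bool × List (Int × String) :=
  let base := segs.foldl mtB_emit (initLB lead lb0, lead.map projE)
  match cur with
  | none => (base.1, false, base.2)
  | some c => ((mtB_emit base c).1, !(c.1.2.2.1 == "reset"), (mtB_emit base c).2)

-- entries produced by closing a segmentation state and emitting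
def pipeOut (fin : List (Int × Int × String × Int) × List ((Int × Int × String × Int) × List (Int × Int × String × Int)) × Option ((Int × Int × String × Int) × List (Int × Int × String × Int)))
    (lb0 : String) : List (Int × String) :=
  match fin.2.2 with
  | some c => ((fin.2.1 ++ [c]).foldl mtB_emit (initLB fin.1 lb0, fin.1.map projE)).2
  | none => (fin.2.1.foldl mtB_emit (initLB fin.1 lb0, fin.1.map projE)).2

-- segmentation + emission equals the flat replay
lemma seg_loop (L : List (Int × Int × String × Int))
    (hL : ∀ b ∈ L, b.2.2.2 = 0 ∨ b.2.2.2 = 1) :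
    ∀ lead segs cur lb0, (cur = none → segs = []) →
    pipeOut (L.foldl mtB_segStep (lead, segs, cur)) lb0
      = (L.foldl mtS_step (emitUpTo lead segs cur lb0)).2.2 := by
  induction L with
  | nil =>
    intro lead segs cur lb0 hc
    cases cur with
    | none =>
      have hs := hc rfl; subst hs
      simp [pipeOut, emitUpTo]
    | some c => simp [pipeOut, emitUpTo, List.foldl_append]
  | cons b L ih =>
    intro lead segs cur lb0 hc
    have hb := hL b (List.mem_cons_self)
    have hL' : ∀ x ∈ L, x.2.2.2 = 0 ∨ x.2.2.2 = 1 := fun x hx => hL x (List.mem_cons_of_mem b hx)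
    rcases hb with h0 | h1
    · cases cur with
      | none =>
        have hs := hc rfl; subst hs
        have hstep : mtB_segStep (lead, [], none) b = (lead ++ [b], [], none) := by
          simp [mtB_segStep, h0]
        have hstate : mtS_step (emitUpTo lead [] none lb0) b = emitUpTo (lead ++ [b]) [] none lb0 := by
          simp [mtS_step, emitUpTo, h0, initLB, projE]
        rw [List.foldl_cons, hstep, List.foldl_cons, hstate, ih hL' _ _ _ _ (fun _ => rfl)]
      | some c =>
        have hstep : mtB_segStep (lead, segs, some c) b = (lead, segs, some (c.1, c.2 ++ [b])) := by
          simp [mtB_segStep, h0]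
        have hstate : mtS_step (emitUpTo lead segs (some c) lb0) b
            = emitUpTo lead segs (some (c.1, c.2 ++ [b])) lb0 := by
          by_cases hr : c.1.2.2.1 = "reset" <;>
            simp [mtS_step, emitUpTo, mtB_emit, h0, hr]
        rw [List.foldl_cons, hstep, List.foldl_cons, hstate, ih hL' _ _ _ _ (fun h => by simp at h)]
    · cases cur with
      | none =>
        have hs := hc rfl; subst hs
        have hstep : mtB_segStep (lead, [], none) b = (lead, [], some (b, [])) := by
          simp [mtB_segStep, h1]
        have hstate : mtS_step (emitUpTo lead [] none lb0) b
            = emitUpTo lead [] (some (b, [])) lb0 := by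
          by_cases hr : b.2.2.1 = "reset" <;>
            simp [mtS_step, emitUpTo, mtB_emit, h1, hr]
        rw [List.foldl_cons, hstep, List.foldl_cons, hstate, ih hL' _ _ _ _ (fun h => by simp at h)]
      | some c =>
        have hstep : mtB_segStep (lead, segs, some c) b = (lead, segs ++ [c], some (b, [])) := by
          simp [mtB_segStep, h1]
        have hstate : mtS_step (emitUpTo lead segs (some c) lb0) b
            = emitUpTo lead (segs ++ [c]) (some (b, [])) lb0 := by
          by_cases hr : b.2.2.1 = "reset" <;>
            simp [mtS_step, emitUpTo, mtB_emit, h1, hr, List.foldl_append]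
        rw [List.foldl_cons, hstep, List.foldl_cons, hstate, ih hL' _ _ _ _ (fun h => by simp at h)]

-- flattened bases of a segmentation state
def flatSt (st : List (Int × Int × String × Int) × List ((Int × Int × String × Int) × List (Int × Int × String × Int)) × Option ((Int × Int × String × Int) × List (Int × Int × String × Int))) : List (Int × Int × String × Int) :=
  st.1 ++ st.2.1.flatMap (fun sg => sg.2) ++ (match st.2.2 with | some c => c.2 | none => [])

lemma seg_flat_fold (L : List (Int × Int × String × Int))
    (hL : ∀ b ∈ L, b.2.2.2 = 0 ∨ b.2.2.2 = 1) :
    ∀ lead segs cur, (cur = none → segs = []) →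
    flatSt (L.foldl mtB_segStep (lead, segs, cur))
      = flatSt (lead, segs, cur) ++ L.filter (fun b => b.2.2.2 == 0) := by
  induction L with
  | nil => intro lead segs cur _; simp
  | cons b L ih =>
    intro lead segs cur hc
    have hb := hL b (List.mem_cons_self)
    have hL' : ∀ x ∈ L, x.2.2.2 = 0 ∨ x.2.2.2 = 1 := fun x hx => hL x (List.mem_cons_of_mem b hx)
    rcases hb with h0 | h1
    · cases cur with
      | none =>
        have hs := hc rfl; subst hs
        have hstep : mtB_segStep (lead, [], none) b = (lead ++ [b], [], none) := by
          simp [mtB_segStep, h0]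
        rw [List.foldl_cons, hstep, ih hL' _ _ _ (fun _ => rfl)]
        simp [flatSt, h0]
      | some c =>
        have hstep : mtB_segStep (lead, segs, some c) b = (lead, segs, some (c.1, c.2 ++ [b])) := by
          simp [mtB_segStep, h0]
        rw [List.foldl_cons, hstep, ih hL' _ _ _ (fun h => by simp at h)]
        simp [flatSt, h0]
    · cases cur with
      | none =>
        have hs := hc rfl; subst hs
        have hstep : mtB_segStep (lead, [], none) b = (lead, [], some (b, [])) := by
          simp [mtB_segStep, h1]
        rw [List.foldl_cons, hstep, ih hL' _ _ _ (fun h => by simp at h)]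
        simp [flatSt, h1]
      | some c =>
        have hstep : mtB_segStep (lead, segs, some c) b = (lead, segs ++ [c], some (b, [])) := by
          simp [mtB_segStep, h1]
        rw [List.foldl_cons, hstep, ih hL' _ _ _ (fun h => by simp at h)]
        simp [flatSt, h1]

-- the bases collected by segmentation are exactly the tag-0 blocks, in order
lemma segments_flat (L : List (Int × Int × String × Int))
    (hL : ∀ b ∈ L, b.2.2.2 = 0 ∨ b.2.2.2 = 1) :
    (mtB_segments L).1 ++ (mtB_segments L).2.flatMap (fun sg => sg.2)
      = L.filter (fun b => b.2.2.2 == 0) := by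
  have h := seg_flat_fold L hL [] [] none (fun _ => rfl)
  simp only [flatSt, List.nil_append, List.flatMap_nil, List.append_nil] at h
  unfold mtB_segments
  rcases hfin : L.foldl mtB_segStep ([], [], none) with ⟨lead, segs, cur⟩
  rw [hfin] at h
  cases cur with
  | none => simpa using h
  | some c => simpa [List.flatMap_append, List.append_assoc] using h

lemma find?_reverse_eq_getLast?_filter {α : Type} (p : α → Bool) (l : List α) :
    l.reverse.find? p = (l.filter p).getLast? := by
  induction l with
  | nil => rfl
  | cons a l ih =>
    by_cases h : p a = true
    · simp only [List.reverse_cons, List.find?_append, ih, List.filter_cons, h]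
      cases hf : l.filter p with
      | nil => simp [List.find?, h]
      | cons y ys =>
        obtain ⟨z, hz⟩ : ∃ z, (y :: ys).getLast? = some z :=
          ⟨(y :: ys).getLast (by simp), List.getLast?_eq_some_getLast (by simp)⟩
        simp [hz]
    · simp only [List.reverse_cons, List.find?_append, ih, List.filter_cons, h]
      simp [List.find?, h]

-- the explicit k-th range: start k, start (k+1) (wrapping), temperature k
def pvRng (m : List (Int × Int × String)) (k : Nat) : Int × Int × String :=
  ((m.getD k (0, 0, "")).1, (m.getD ((k + 1) % m.length) (0, 0, "")).1, (m.getD k (0, 0, "")).2.2)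

-- A's cut pass produces exactly the wrapped ranges
lemma cut_eq_ranges (m : List (Int × Int × String)) (hm : m ≠ []) :
    mtA_cut m = (List.range m.length).map (pvRng m) := by
  have hn : m.length - 1 + 1 = m.length := Nat.succ_pred_eq_of_pos (List.length_pos_iff.2 hm)
  unfold mtA_cut
  rw [PySem.List.foldl_append_singleton_eq_map]
  rw [← hn, List.range_succ, List.map_append]
  congr 1
  · apply List.map_congr_left
    intro k hk
    have hk' : k + 1 < m.length - 1 + 1 := by simpa using List.mem_range.1 hk
    simp [pvRng, Nat.mod_eq_of_lt (by omega : k + 1 < m.length)]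
  · simp [pvRng, hn, Nat.mod_self]

-- B's zip-with-rotation equals indexing with wrap-around
lemma zip_rot_eq (e : List (Int × String)) :
    e.zip ((e.map (fun x => x.1)).drop 1 ++ (e.map (fun x => x.1)).take 1)
      = (List.range e.length).map (fun k => (e.getD k (0, ""), (e.getD ((k + 1) % e.length) (0, "")).1)) := by
  apply List.ext_getElem
  · simp [List.length_zip, List.length_take]; omega
  · intro i h1 h2
    have hi : i < e.length := by simpa using h2
    simp only [List.getElem_zip, List.getElem_map, List.getElem_range]
    by_cases hlt : i + 1 < e.length
    · have hd : i < ((e.map (fun x => x.1)).drop 1).length := by simp; omega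
      rw [List.getElem_append_left hd]
      simp [hi, hlt, Nat.mod_eq_of_lt hlt]
    · have hie : i = e.length - 1 := by omega
      have hd : ((e.map (fun x => x.1)).drop 1).length ≤ i := by simp; omega
      rw [List.getElem_append_right hd]
      have h0 : i - ((e.map (fun x => x.1)).drop 1).length = 0 := by simp; omega
      have hmod : (i + 1) % e.length = 0 := by
        have : i + 1 = e.length := by omega
        simp [this]
      have h02 : 0 < e.length := by omega
      have hi0 : i - (e.length - 1) = 0 := by omega
      simp [hmod, hi0, hi, h02]

-- the step of A's coalescing fold, named
def cStep (st : List (Int × Int × String) × Int × Int × String) (b : Int × Int × String) :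
    List (Int × Int × String) × Int × Int × String :=
  if b.2.2 = st.2.2.2 then (st.1, st.2.1, b.2.1, st.2.2.2)
  else (st.1 ++ [(st.2.1, st.2.2.1, st.2.2.2)], b.1, b.2.1, b.2.2)

lemma mtA_coal_cons (s e : Int) (t : String) (rest : List (Int × Int × String)) :
    mtA_coal ((s, e, t) :: rest)
      = (rest.foldl cStep ([], s, e, t)).1
        ++ [((rest.foldl cStep ([], s, e, t)).2.1, (rest.foldl cStep ([], s, e, t)).2.2.1,
             (rest.foldl cStep ([], s, e, t)).2.2.2)] := by
  rfl

-- B's extend-last coalescing fold equals A's accumulator fold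
lemma coalB_sim (rs : List (Int × Int × String)) :
    ∀ (out : List (Int × Int × String)) (c : Int × Int × String),
    rs.foldl mtB_coalStep (out ++ [c])
      = (rs.foldl cStep (out, c.1, c.2.1, c.2.2)).1
        ++ [((rs.foldl cStep (out, c.1, c.2.1, c.2.2)).2.1,
             (rs.foldl cStep (out, c.1, c.2.1, c.2.2)).2.2.1,
             (rs.foldl cStep (out, c.1, c.2.1, c.2.2)).2.2.2)] := by
  induction rs with
  | nil => intro out c; simp
  | cons b rs ih =>
    intro out c
    by_cases h : b.2.2 = c.2.2
    · have h1 : mtB_coalStep (out ++ [c]) b = out ++ [(c.1, b.2.1, b.2.2)] := by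
        simp [mtB_coalStep, h]
      have h2 : cStep (out, c.1, c.2.1, c.2.2) b = (out, c.1, b.2.1, c.2.2) := by
        simp [cStep, h]
      simp only [List.foldl_cons, h1, h2]
      simpa [h] using ih out (c.1, b.2.1, b.2.2)
    · have h' : ¬c.2.2 = b.2.2 := fun hx => h hx.symm
      have h1 : mtB_coalStep (out ++ [c]) b = (out ++ [c]) ++ [b] := by
        simp [mtB_coalStep, h']
      have h2 : cStep (out, c.1, c.2.1, c.2.2) b = (out ++ [(c.1, c.2.1, c.2.2)], b.1, b.2.1, b.2.2) := by
        simp [cStep, h]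
      simp only [List.foldl_cons, h1, h2]
      rw [ih (out ++ [c]) b]

lemma coalB_eq_mtA_coal (rs : List (Int × Int × String)) :
    rs.foldl mtB_coalStep [] = mtA_coal rs := by
  cases rs with
  | nil => rfl
  | cons r rs =>
    have h1 : mtB_coalStep [] r = [] ++ [r] := rfl
    obtain ⟨s, e, t⟩ := r
    simp only [List.foldl_cons, h1, List.nil_append]
    rw [mtA_coal_cons]
    simpa using coalB_sim rs [] (s, e, t)

lemma optmap_pvProj (o : Option (Int × Int × String)) :
    (o.map pvProj).getD (0, "") = pvProj (o.getD (0, 0, "")) := by cases o <;> rfl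

-- B's phases 3-4 on projected entries equal A's cut-filter-coalesce chain
lemma tail_eq (m : List (Int × Int × String)) :
    ((((m.map pvProj).zip (((m.map pvProj).map (fun x => x.1)).drop 1 ++ ((m.map pvProj).map (fun x => x.1)).take 1)).filter
        (fun q => !(q.1.1 == q.2))).map (fun q => (q.1.1, q.2, q.1.2))).foldl mtB_coalStep []
      = mtA_coal ((mtA_cut m).filter (fun x => !(x.1 == x.2.1))) := by
  by_cases hm : m = []
  · subst hm; rfl
  · rw [zip_rot_eq (m.map pvProj), cut_eq_ranges m hm, coalB_eq_mtA_coal]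
    congr 1
    rw [List.filter_map, List.filter_map, List.map_map]
    have hlen : (m.map pvProj).length = m.length := by simp
    have hcomp : ((fun q => (q.1.1, q.2, q.1.2)) ∘
        (fun k => ((m.map pvProj).getD k (0, ""), ((m.map pvProj).getD ((k + 1) % (m.map pvProj).length) (0, "")).1)))
        = pvRng m := by
      funext k
      simp [Function.comp, pvRng, hlen, List.getD, optmap_pvProj, pvProj]
    have hpred : ((fun q : (Int × String) × Int => !(q.1.1 == q.2)) ∘
        (fun k => ((m.map pvProj).getD k (0, ""), ((m.map pvProj).getD ((k + 1) % (m.map pvProj).length) (0, "")).1)))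
        = (fun x => !(x.1 == x.2.1)) ∘ pvRng m := by
      funext k
      simp [Function.comp, pvRng, hlen, List.getD, optmap_pvProj, pvProj]
    rw [hcomp, hpred, hlen]

-- ===== VERDICT (by name: the statement is the Claim_ definition above) =====
theorem merge_timetables_spec : Claim_equal_merge_timetables := by
  intro base tt _ hpre
  obtain ⟨hb, -, -⟩ := hpre
  unfold Spec_merge_timetables merge_timetables merge_timetables_alt
  simp only
  set S := PySem.List.sorted (base.map (fun x => (x.1, x.2.1, x.2.2, (0 : Int)))
      ++ tt.map (fun x => (x.1, x.2.1, x.2.2, (1 : Int)))) (fun x => x.1) false with hS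
  have htags : ∀ x ∈ S, x.2.2.2 = 0 ∨ x.2.2.2 = 1 := by
    intro x hx
    rw [hS, PySem.List.mem_sorted] at hx
    rcases List.mem_append.1 hx with h | h <;> rcases List.mem_map.1 h with ⟨y, -, rfl⟩ <;> simp
  cases hf : S.reverse.find? (fun x => x.2.2.2 == 0) with
  | none =>
    exfalso
    cases base with
    | nil => exact hb rfl
    | cons b0 bs =>
      have hmem : (b0.1, b0.2.1, b0.2.2, (0 : Int)) ∈ S := by
        rw [hS, PySem.List.mem_sorted]
        exact List.mem_append_left _ (List.mem_map.2 ⟨b0, List.mem_cons_self, rfl⟩)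
      have h2 := List.find?_eq_none.1 hf _ (List.mem_reverse.2 hmem)
      simp at h2
  | some lb0 =>
    have hlastf : (S.filter (fun b => b.2.2.2 == 0)).getLast? = some lb0 := by
      rw [← find?_reverse_eq_getLast?_filter]; exact hf
    have hflat := segments_flat S htags
    rcases hp : mtB_segments S with ⟨lead, segs⟩
    rw [hp] at hflat
    -- B's initial last_base equals initLB lead lb0.2.2.1
    have hlb : (match lead.getLast? with
        | some b => b.2.2.1
        | none => (segs.flatMap (fun sg => sg.2.map (fun b => b.2.2.1))).getLastD "")
        = initLB lead lb0.2.2.1 := by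
      cases hg : lead.getLast? with
      | some b => simp [initLB, hg]
      | none =>
        have hnil : lead = [] := List.getLast?_eq_none_iff.1 hg
        subst hnil
        simp only [List.nil_append] at hflat
        have hmapped : segs.flatMap (fun sg => sg.2.map (fun b => b.2.2.1))
            = (S.filter (fun b => b.2.2.2 == 0)).map (fun b => b.2.2.1) := by
          rw [← hflat, List.map_flatMap]
        simp only [initLB, hmapped]
        rw [List.getLastD_eq_getLast?, List.getLast?_map, hlastf]
        rfl
    -- entries produced by B equal A's merged_timetable projected by pvProj
    have hseg := seg_loop S htags [] [] none lb0.2.2.1 (fun _ => rfl)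
    have hinit : emitUpTo [] [] none lb0.2.2.1 = (lb0.2.2.1, false, []) := by
      simp [emitUpTo, initLB]
    rw [hinit] at hseg
    have hloop := loop_sim S htags (lb0.1, lb0.2.1, lb0.2.2.1) none []
    simp only [Option.isSome_none, List.map_nil] at hloop
    rw [hloop] at hseg
    have hpipe : pipeOut (S.foldl mtB_segStep ([], [], none)) lb0.2.2.1
        = (segs.foldl mtB_emit (initLB lead lb0.2.2.1, lead.map projE)).2 := by
      unfold mtB_segments at hp
      rcases hfin : S.foldl mtB_segStep ([], [], none) with ⟨ld, sg, cu⟩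
      rw [hfin] at hp
      cases cu with
      | none =>
        simp only at hp
        obtain ⟨rfl, rfl⟩ : ld = lead ∧ sg = segs := by
          constructor <;> [exact congrArg Prod.fst hp; exact congrArg Prod.snd hp]
        simp [pipeOut]
      | some c =>
        simp only at hp
        obtain ⟨rfl, rfl⟩ : ld = lead ∧ sg ++ [c] = segs := by
          constructor <;> [exact congrArg Prod.fst hp; exact congrArg Prod.snd hp]
        simp [pipeOut]
    rw [hpipe] at hseg
    rw [hlb]
    have hseg2 : (List.foldl mtB_emit (initLB lead lb0.2.2.1,
        List.map (fun b : Int × Int × String × Int => (b.1, b.2.2.1)) (lead, segs).1) (lead, segs).2).2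
        = (List.foldl mtA_step ((lb0.1, lb0.2.1, lb0.2.2.1), none, []) S).2.2.map pvProj := hseg
    rw [hseg2]
    exact (tail_eq _).symm
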